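-- pv_equiv track=rewrite | github.com/HomelessCanadian/rblx-obscure-scripts | 1bitVideoPlayer/luaBitmapChunker16.py | bitmap_to_hex_string
-- ===== SOURCE A (Python) =====
-- def bitmap_to_hex_string(bitmap_data):
--     bytes_data = bytearray()
--     for i in range(0, len(bitmap_data), 8):
--         byte = 0
--         for j in range(8):
--             if i + j < len(bitmap_data) and bitmap_data[i + j]:
--                 byte |= (1 << (7 - j))
--         bytes_data.append(byte)
--     return ''.join(f'{b:02x}' for b in bytes_data)
-- ===== SOURCE B (Python) =====
-- def bitmap_to_hex_string(bitmap_data):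
--     out = bytearray()
--     byte = 0
--     for idx, bit in enumerate(bitmap_data):
--         if bit:
--             byte |= 1 << (7 - idx % 8)
--         if idx % 8 == 7:
--             out.append(byte)
--             byte = 0
--     if len(bitmap_data) % 8:
--         out.append(byte)
--     return ''.join(f'{b:02x}' for b in out)
-- ===== Notes on version B (the rewrite author's own statement) =====
-- stated objective: simpler
-- what changed: Replaced A's nested loops (outer over chunk starts range(0,len,8), inner over the 8 bit positions with a bounds guard) by a single flat enumerate pass that accumulates one byte and flushes it every 8 bits, appending the trailing partial byte only when leftover bits exist.
import Mathlib
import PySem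

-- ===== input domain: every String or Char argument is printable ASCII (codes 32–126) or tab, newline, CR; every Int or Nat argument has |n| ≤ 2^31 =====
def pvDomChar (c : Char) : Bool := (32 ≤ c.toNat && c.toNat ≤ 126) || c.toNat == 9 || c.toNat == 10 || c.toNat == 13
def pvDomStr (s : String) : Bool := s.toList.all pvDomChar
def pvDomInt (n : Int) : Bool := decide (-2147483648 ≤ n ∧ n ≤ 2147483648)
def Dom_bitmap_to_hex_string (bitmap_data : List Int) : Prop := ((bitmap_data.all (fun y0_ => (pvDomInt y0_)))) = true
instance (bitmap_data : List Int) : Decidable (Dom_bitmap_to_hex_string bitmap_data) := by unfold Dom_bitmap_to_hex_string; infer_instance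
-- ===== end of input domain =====

-- B replaces A's nested chunk-of-8 loops by one flat enumerated pass that flushes a byte every 8 bits (objective: simpler; same cost).

-- ===== PORT A =====
-- f'{b:02x}' for 0 ≤ b ≤ 255 (every bytearray element): exactly two lowercase hex digits (shared by both ports).
def pvHexDigit (n : Nat) : Char := if n < 10 then Char.ofNat (48 + n) else Char.ofNat (87 + n)
def pvHex2 (b : Int) : List Char := [pvHexDigit (b.toNat / 16), pvHexDigit (b.toNat % 16)]

def bitmap_to_hex_string (bitmap_data : List Int) : String :=
  let bytes := (PySem.List.pyRange 0 (bitmap_data.length : Int) 8).foldl (fun bs i =>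
    let byte := (PySem.List.pyRange 0 8 1).foldl (fun byte j =>
      if i + j < (bitmap_data.length : Int) ∧ PySem.List.pyGetD bitmap_data (i + j) 0 ≠ 0 then
        PySem.Int.bor byte ((1 : Int) <<< (7 - j).toNat)
      else byte) 0
    bs ++ [byte]) ([] : List Int)
  String.ofList ((bytes.map pvHex2).flatten)

-- ===== PORT B =====
def pvStepB (st : List Int × Int) (p : Int × Int) : List Int × Int :=
  let byte := if p.2 ≠ 0 then PySem.Int.bor st.2 ((1 : Int) <<< (7 - PySem.Int.mod p.1 8).toNat) else st.2
  if PySem.Int.mod p.1 8 = 7 then (st.1 ++ [byte], 0) else (st.1, byte)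

def bitmap_to_hex_string_alt (bitmap_data : List Int) : String :=
  let st := (PySem.List.enumerate bitmap_data 0).foldl pvStepB (([] : List Int), (0 : Int))
  let bytes := if PySem.Int.mod (bitmap_data.length : Int) 8 ≠ 0 then st.1 ++ [st.2] else st.1
  String.ofList ((bytes.map pvHex2).flatten)

-- ===== PRECONDITION & SPEC =====
def Spec_bitmap_to_hex_string (bitmap_data : List Int) (out : String) : Prop := out = bitmap_to_hex_string_alt bitmap_data
instance (bitmap_data : List Int) (out : String) : Decidable (Spec_bitmap_to_hex_string bitmap_data out) := by unfold Spec_bitmap_to_hex_string; infer_instance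

-- ===== CLAIM (what is proved, stated in full; the proofs are below) =====
def Claim_equal_bitmap_to_hex_string : Prop := ∀ (bitmap_data : List Int), Dom_bitmap_to_hex_string bitmap_data → Spec_bitmap_to_hex_string bitmap_data (bitmap_to_hex_string bitmap_data)

-- ===== LEMMAS AND PROOFS =====

-- the byte A builds for the chunk starting at index i (A's inner loop, as a function)
def pvByteA (l : List Int) (i : Int) : Int :=
  (PySem.List.pyRange 0 8 1).foldl (fun byte j =>
    if i + j < (l.length : Int) ∧ PySem.List.pyGetD l (i + j) 0 ≠ 0 then
      PySem.Int.bor byte ((1 : Int) <<< (7 - j).toNat)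
    else byte) 0

-- reference bit-by-bit state machine: p = position in the current byte (0..7)
def pvRst (l : List Int) (p : Nat) (cur : Int) : List Int × Int :=
  match l with
  | [] => ([], cur)
  | b :: t =>
    let cur' := if b ≠ 0 then PySem.Int.bor cur ((1 : Int) <<< (7 - p)) else cur
    if p = 7 then
      let r := pvRst t 0 0
      (cur' :: r.1, r.2)
    else pvRst t (p + 1) cur'

def pvFlush (l : List Int) : List Int :=
  let r := pvRst l 0 0
  if PySem.Int.mod (l.length : Int) 8 ≠ 0 then r.1 ++ [r.2] else r.1

-- B's fold computes pvRst (tracked position = index mod 8)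
lemma pvLemB (l : List Int) : ∀ (i : Int) (p : Nat) (bytes : List Int) (cur : Int),
    PySem.Int.mod i 8 = (p : Int) →
    (PySem.List.enumerate l i).foldl pvStepB (bytes, cur)
      = (bytes ++ (pvRst l p cur).1, (pvRst l p cur).2) := by
  induction l with
  | nil => intro i p bytes cur h; simp [pvRst, PySem.List.enumerate]
  | cons b t ih =>
    intro i p bytes cur h
    rw [PySem.List.enumerate_cons]
    simp only [List.foldl_cons]
    by_cases h7 : p = 7
    · have hnext : PySem.Int.mod (i + 1) 8 = ((0 : Nat) : Int) := by
        rw [PySem.Int.mod_eq_emod_of_pos (by norm_num)]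
        rw [PySem.Int.mod_eq_emod_of_pos (by norm_num)] at h
        omega
      rw [pvStepB]
      simp only [h, h7]
      norm_num
      rw [ih (i + 1) 0 _ _ hnext]
      simp [pvRst]
    · have hp8 : (p : Int) < 8 := by
        rw [← h]; exact PySem.Int.mod_lt _ (by norm_num)
      have hnext : PySem.Int.mod (i + 1) 8 = ((p + 1 : Nat) : Int) := by
        rw [PySem.Int.mod_eq_emod_of_pos (by norm_num)]
        rw [PySem.Int.mod_eq_emod_of_pos (by norm_num)] at h
        push_cast
        omega
      rw [pvStepB]
      simp only [h]
      rw [if_neg (by exact_mod_cast fun hh => h7 (by exact_mod_cast hh))]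
      rw [ih (i + 1) (p + 1) _ _ hnext]
      have hsub : ((7 : Int) - (p : Int)).toNat = 7 - p := by omega
      simp [pvRst, h7, hsub]

lemma pvRst_short (l : List Int) (h0 : l ≠ []) (h : l.length < 8) :
    pvRst l 0 0 = ([], pvByteA l 0) := by
  have hr : PySem.List.pyRange 0 8 1 = [0,1,2,3,4,5,6,7] := by decide
  rcases l with _ | ⟨a, _ | ⟨b, _ | ⟨c, _ | ⟨d, _ | ⟨e, _ | ⟨f, _ | ⟨g, _ | ⟨x, t⟩⟩⟩⟩⟩⟩⟩⟩
  · exact absurd rfl h0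
  · simp [pvRst, pvByteA, hr, PySem.List.pyGetD_ofNat']
  · simp [pvRst, pvByteA, hr, PySem.List.pyGetD_ofNat']
  · simp [pvRst, pvByteA, hr, PySem.List.pyGetD_ofNat']
  · simp [pvRst, pvByteA, hr, PySem.List.pyGetD_ofNat']
  · simp [pvRst, pvByteA, hr, PySem.List.pyGetD_ofNat']
  · simp [pvRst, pvByteA, hr, PySem.List.pyGetD_ofNat']
  · simp [pvRst, pvByteA, hr, PySem.List.pyGetD_ofNat']
  · simp at h; omega

lemma pvByteA_unguarded (l : List Int) (h : 8 ≤ l.length) :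
    pvByteA l 0 = (PySem.List.pyRange 0 8 1).foldl (fun byte j =>
      if PySem.List.pyGetD l j 0 ≠ 0 then PySem.Int.bor byte ((1 : Int) <<< (7 - j).toNat)
      else byte) 0 := by
  unfold pvByteA
  apply PySem.List.foldl_congr_mem
  intro acc j hj
  rw [PySem.List.mem_pyRange_one] at hj
  rw [zero_add]
  rw [if_congr (and_iff_right (show j < (l.length : Int) by exact_mod_cast by omega)) rfl rfl]

lemma pvRst_chunk (l : List Int) (h : 8 ≤ l.length) :
    pvRst l 0 0 = (pvByteA l 0 :: (pvRst (l.drop 8) 0 0).1, (pvRst (l.drop 8) 0 0).2) := by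
  have hr : PySem.List.pyRange 0 8 1 = [0,1,2,3,4,5,6,7] := by decide
  rcases l with _ | ⟨a, _ | ⟨b, _ | ⟨c, _ | ⟨d, _ | ⟨e, _ | ⟨f, _ | ⟨g, _ | ⟨x, t⟩⟩⟩⟩⟩⟩⟩⟩ <;>
    simp at h
  rw [pvByteA_unguarded _ (by simp)]
  simp [pvRst, hr, PySem.List.pyGetD_ofNat']

lemma pvGetD_drop (l : List Int) (k : Int) (hk : 0 ≤ k) (h : 8 + k < (l.length : Int)) :
    PySem.List.pyGetD (l.drop 8) k 0 = PySem.List.pyGetD l (8 + k) 0 := by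
  rw [PySem.List.pyGetD_eq_getElem (l.drop 8) 0 hk (by simp; omega),
      PySem.List.pyGetD_eq_getElem l 0 (by omega) h]
  rw [List.getElem_drop]
  congr 1
  omega

lemma pvCond_shift (l : List Int) (i j : Int) (hi : 0 ≤ i) (hj : 0 ≤ j) :
    ((i + 8) + j < (l.length : Int) ∧ PySem.List.pyGetD l ((i + 8) + j) 0 ≠ 0) ↔
    (i + j < (((l.drop 8).length : Nat) : Int) ∧ PySem.List.pyGetD (l.drop 8) (i + j) 0 ≠ 0) := by
  rw [List.length_drop]
  constructor
  · rintro ⟨h1, h2⟩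
    refine ⟨by omega, ?_⟩
    rw [pvGetD_drop l (i + j) (by omega) (by omega)]
    rw [show (8 : Int) + (i + j) = (i + 8) + j by ring]
    exact h2
  · rintro ⟨h1, h2⟩
    refine ⟨by omega, ?_⟩
    rw [← show (8 : Int) + (i + j) = (i + 8) + j by ring]
    rw [← pvGetD_drop l (i + j) (by omega) (by omega)]
    exact h2

lemma pvByteA_shift (l : List Int) (i : Int) (hi : 0 ≤ i) :
    pvByteA l (i + 8) = pvByteA (l.drop 8) i := by
  unfold pvByteA
  apply PySem.List.foldl_congr_mem
  intro acc j hj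
  rw [PySem.List.mem_pyRange_one] at hj
  rw [if_congr (pvCond_shift l i j hi (by omega)) rfl rfl]

lemma pvLemA (n : Nat) : ∀ (l : List Int), l.length = n →
    (PySem.List.pyRange 0 (l.length : Int) 8).map (pvByteA l) = pvFlush l := by
  induction n using Nat.strong_induction_on with
  | _ n ih =>
    intro l hn
    by_cases h0 : l = []
    · subst h0
      simp [pvFlush, pvRst, PySem.List.pyRange_of_pos 0 0 (by norm_num : (0:Int) < 8)]
    · have hpos : 0 < l.length := List.length_pos_of_ne_nil h0
      rw [PySem.List.pyRange_of_pos 0 (l.length : Int) (by norm_num : (0:Int) < 8)]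
      rw [if_pos (by exact_mod_cast hpos)]
      have hcnt : (((l.length : Int) - 0 + 8 - 1) / 8).toNat = (l.length + 7) / 8 := by omega
      rw [hcnt]
      obtain ⟨m, hm⟩ : ∃ m, (l.length + 7) / 8 = m + 1 := ⟨(l.length + 7) / 8 - 1, by omega⟩
      rw [hm, List.map_map, List.range_succ_eq_map, List.map_cons, List.map_map]
      have hhead : ((pvByteA l) ∘ fun k : Nat => (0 : Int) + 8 * (k : Int)) 0 = pvByteA l 0 := by
        simp [Function.comp]
      have htail : ∀ k ∈ List.range m,
          (((pvByteA l) ∘ fun k : Nat => (0 : Int) + 8 * (k : Int)) ∘ Nat.succ) k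
            = pvByteA (l.drop 8) ((0 : Int) + 8 * (k : Int)) := by
        intro k _
        simp only [Function.comp]
        rw [show (0 : Int) + 8 * ((Nat.succ k : Nat) : Int) = (0 + 8 * (k : Int)) + 8 by push_cast; ring]
        exact pvByteA_shift l _ (by positivity)
      rw [hhead, List.map_congr_left htail]
      have hdl : (l.drop 8).length = l.length - 8 := List.length_drop
      -- the tail equals pvFlush of the dropped list, by the induction hypothesis
      have htail2 : (List.range m).map (fun k : Nat => pvByteA (l.drop 8) ((0 : Int) + 8 * (k : Int))) = pvFlush (l.drop 8) := by
        have hIH : (PySem.List.pyRange 0 ((l.drop 8).length : Int) 8).map (pvByteA (l.drop 8)) = pvFlush (l.drop 8) := by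
          apply ih (l.drop 8).length _ _ rfl
          omega
        rw [PySem.List.pyRange_of_pos 0 ((l.drop 8).length : Int) (by norm_num : (0:Int) < 8), List.map_map] at hIH
        rcases Nat.eq_zero_or_pos (l.drop 8).length with hz | hp
        · have hm0 : m = 0 := by omega
          have hd0 : l.drop 8 = [] := List.eq_nil_of_length_eq_zero hz
          subst hm0
          simp [hd0, pvFlush, pvRst]
        · rw [if_pos (by exact_mod_cast hp)] at hIH
          have hcnt2 : ((((l.drop 8).length : Int) - 0 + 8 - 1) / 8).toNat = ((l.drop 8).length + 7) / 8 := by omega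
          rw [hcnt2, show ((l.drop 8).length + 7) / 8 = m by omega] at hIH
          exact hIH
      rw [htail2]
      rcases Nat.lt_or_ge l.length 8 with hlt | hge
      · have hd0 : l.drop 8 = [] := List.eq_nil_of_length_eq_zero (by omega)
        rw [hd0, show pvFlush ([] : List Int) = [] by simp [pvFlush, pvRst]]
        rw [show pvFlush l = [pvByteA l 0] by
          simp only [pvFlush]
          rw [pvRst_short l h0 hlt,
              if_pos (by rw [PySem.Int.mod_eq_emod_of_pos (by norm_num)]; omega)]
          simp]
      · rw [show pvFlush l = pvByteA l 0 :: pvFlush (l.drop 8) by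
          simp only [pvFlush]
          rw [pvRst_chunk l hge]
          rw [show PySem.Int.mod ((l.length : Int)) 8 = PySem.Int.mod (((l.drop 8).length : Int)) 8 by
            rw [PySem.Int.mod_eq_emod_of_pos (by norm_num), PySem.Int.mod_eq_emod_of_pos (by norm_num)]
            omega]
          split_ifs <;> simp]

-- ===== VERDICT (by name: the statement is the Claim_ definition above) =====
theorem bitmap_to_hex_string_spec : Claim_equal_bitmap_to_hex_string := by
  intro l _
  show String.ofList ((((PySem.List.pyRange 0 (l.length : Int) 8).foldl
      (fun bs i => bs ++ [pvByteA l i]) []).map pvHex2).flatten)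
    = String.ofList (((if PySem.Int.mod (l.length : Int) 8 ≠ 0
        then ((PySem.List.enumerate l 0).foldl pvStepB ([], 0)).1 ++ [((PySem.List.enumerate l 0).foldl pvStepB ([], 0)).2]
        else ((PySem.List.enumerate l 0).foldl pvStepB ([], 0)).1).map pvHex2).flatten)
  rw [PySem.List.foldl_append_singleton_eq_map (pvByteA l)]
  rw [pvLemB l 0 0 [] 0 (by decide)]
  simp only [List.nil_append]
  rw [pvLemA l.length l rfl]
  simp only [pvFlush]
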